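-- pv_equiv track=rewrite | github.com/pypi-data/pypi-mirror-119 | packages/ThomCode/ThomCode-1.0.4.tar.gz/ThomCode-1.0.4/ThomCode/__init__.py | FibonacciList
-- ===== SOURCE A (Python) =====
-- def FibonacciList(max):
--     list =[]
--     n = max
--     for i in range(n):
--         if Fibonacci_CALC(i) > n:
--             break
--         list.append (Fibonacci_CALC(i))
--     return list
--
-- def Fibonacci_CALC(n): # hoort bij def fibonacci
--
--    if n <= 1:
--        return n
--    else:
--        return(Fibonacci_CALC(n-1) + Fibonacci_CALC(n-2))
-- ===== SOURCE B (Python) =====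
-- def FibonacciList(max):
--     result = []
--     a, b = 0, 1
--     while a <= max:
--         result.append(a)
--         a, b = b, a + b
--     return result
-- ===== Notes on version B (the rewrite author's own statement) =====
-- stated objective: faster
-- what changed: Replaced the loop that recomputes Fibonacci_CALC(i) by naive exponential recursion (twice per index) with a single running-pair iteration that carries (a,b)=(F_i,F_{i+1}), and dropped the accidental range(max) iteration cap.
-- intended difference: For max in 0..5 A's for-loop over range(max) runs out of indices before the Fibonacci values exceed max, so A returns a truncated list (e.g. [0,1,1] for max=3, [] for max=0); B returns every Fibonacci number <= max ([0,1,1,2,3] for max=3, [0] for max=0), which is the function's stated purpose. — e.g. on FibonacciList(3): A returns [0, 1, 1], B returns [0, 1, 1, 2, 3]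
import Mathlib
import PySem

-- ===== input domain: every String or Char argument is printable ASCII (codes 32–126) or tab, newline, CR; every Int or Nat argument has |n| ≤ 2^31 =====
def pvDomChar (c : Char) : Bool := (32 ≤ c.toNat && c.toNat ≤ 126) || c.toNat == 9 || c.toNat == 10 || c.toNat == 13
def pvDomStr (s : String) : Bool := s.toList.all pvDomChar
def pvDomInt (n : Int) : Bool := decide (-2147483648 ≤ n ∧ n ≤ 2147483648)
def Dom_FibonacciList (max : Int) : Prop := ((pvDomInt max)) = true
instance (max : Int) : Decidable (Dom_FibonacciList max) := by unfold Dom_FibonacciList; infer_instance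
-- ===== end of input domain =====

-- B replaces A's per-index exponential Fibonacci recursion (and its accidental
-- range(max) iteration cap) by a single running-pair loop: asymptotically faster,
-- and on max ∈ [0,5] it returns the intended untruncated list (see D_ below).

-- ===== PORT A =====
-- Fibonacci_CALC: naive double recursion
def fibCalc (n : Int) : Int :=
  if n ≤ 1 then n else fibCalc (n - 1) + fibCalc (n - 2)
termination_by n.toNat
decreasing_by all_goals omega

-- the for-loop over range(n) with its break
def loopA (xs : List Int) (acc : List Int) (n : Int) : List Int :=
  match xs with
  | [] => acc
  | i :: rest => if fibCalc i > n then acc else loopA rest (acc ++ [fibCalc i]) n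

def FibonacciList (max : Int) : List Int :=
  loopA (PySem.List.pyRange 0 max 1) [] max

-- ===== PORT B =====
-- the while a <= max loop of Source B; fuel is only a termination guard
-- (max.toNat + 2 iterations always suffice, since Fibonacci values reach max by then)
def loopB (fuel : Nat) (a b max : Int) (acc : List Int) : List Int :=
  match fuel with
  | 0 => acc
  | f + 1 => if a ≤ max then loopB f b (a + b) max (acc ++ [a]) else acc

def FibonacciList_alt (max : Int) : List Int :=
  loopB (max.toNat + 2) 0 1 max []

-- ===== PRECONDITION & SPEC =====
-- For max in 0..5 A's for-loop over range(max) runs out of indices before the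
-- Fibonacci values exceed max, so A returns a truncated list (e.g. [0,1,1] for
-- max=3); B returns every Fibonacci number ≤ max, the function's stated purpose.
def D_FibonacciList (max : Int) : Prop := 0 ≤ max ∧ max ≤ 5
instance (max : Int) : Decidable (D_FibonacciList max) := by unfold D_FibonacciList; infer_instance

def Spec_FibonacciList (max : Int) (out : List Int) : Prop :=
  ¬ D_FibonacciList max → out = FibonacciList_alt max
instance (max : Int) (out : List Int) : Decidable (Spec_FibonacciList max out) := by unfold Spec_FibonacciList; infer_instance

def pvDiffWitness_FibonacciList : Int := 3
def pvDiffWitnessOut_FibonacciList : (List Int) × (List Int) := ([0, 1, 1], [0, 1, 1, 2, 3])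

-- ===== CLAIM (what is proved, stated in full; the proofs are below) =====
def Claim_unchanged_FibonacciList : Prop := ∀ (max : Int), Dom_FibonacciList max → Spec_FibonacciList max (FibonacciList max)
def Claim_changed_FibonacciList : Prop := Dom_FibonacciList (pvDiffWitness_FibonacciList) ∧ D_FibonacciList (pvDiffWitness_FibonacciList) ∧ FibonacciList (pvDiffWitness_FibonacciList) = pvDiffWitnessOut_FibonacciList.1 ∧ FibonacciList_alt (pvDiffWitness_FibonacciList) = pvDiffWitnessOut_FibonacciList.2 ∧ pvDiffWitnessOut_FibonacciList.1 ≠ pvDiffWitnessOut_FibonacciList.2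
def Claim_exact_FibonacciList : Prop := ∀ (max : Int), Dom_FibonacciList max → D_FibonacciList max → FibonacciList max ≠ FibonacciList_alt max

-- ===== LEMMAS AND PROOFS =====

lemma fibCalc_eq : ∀ n : Nat, fibCalc (n : Int) = (Nat.fib n : Int) := by
  intro n
  induction n using Nat.strong_induction_on with
  | _ n ih =>
    match n with
    | 0 => rw [fibCalc]; norm_num
    | 1 => rw [fibCalc]; norm_num
    | (m + 2) =>
      rw [fibCalc]
      have h1 : ((m + 2 : Nat) : Int) - 1 = ((m + 1 : Nat) : Int) := by push_cast; ring
      have h2 : ((m + 2 : Nat) : Int) - 2 = ((m : Nat) : Int) := by push_cast; ring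
      rw [if_neg (by push_cast; omega), h1, h2, ih (m + 1) (by omega), ih m (by omega),
        Nat.fib_add_two]
      push_cast; ring

lemma fib_lower : ∀ m : Nat, (m : Int) + 8 ≤ (Nat.fib (m + 6) : Int) := by
  intro m
  induction m with
  | zero => norm_num [Nat.fib]
  | succ k ih =>
    have h : Nat.fib (k + 7) = Nat.fib (k + 5) + Nat.fib (k + 6) := Nat.fib_add_two
    have hpos : 0 < Nat.fib (k + 5) := Nat.fib_pos.mpr (by omega)
    have : (k : Int) + 1 + 6 = ((k + 7 : Nat) : Int) := by push_cast; ring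
    push_cast [show k + 1 + 6 = k + 7 from rfl, h]
    push_cast at ih
    omega

-- both loops step in lock-step as long as a break index exists within the range
lemma loop_eq : ∀ (len : Nat) (k fuel : Nat) (acc : List Int) (max : Int),
    (∃ j, j < len ∧ max < (Nat.fib (k + j) : Int)) → len ≤ fuel →
    loopA ((List.range len).map (fun j => ((k + j : Nat) : Int))) acc max
      = loopB fuel (Nat.fib k) (Nat.fib (k + 1)) max acc := by
  intro len
  induction len with
  | zero => intro k fuel acc max ⟨j, hj, _⟩ _; omega
  | succ n ih =>
    intro k fuel acc max ⟨j, hj, hfib⟩ hfuel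
    obtain ⟨f, rfl⟩ : ∃ f, fuel = f + 1 := ⟨fuel - 1, by omega⟩
    have hlist : (List.range (n + 1)).map (fun j => ((k + j : Nat) : Int))
        = ((k : Nat) : Int) :: (List.range n).map (fun j => ((k + 1 + j : Nat) : Int)) := by
      rw [List.range_succ_eq_map]
      simp only [List.map_cons, List.map_map]
      congr 1
      apply List.map_congr_left
      intro x _
      simp only [Function.comp]
      congr 1
      omega
    rw [hlist, loopA, loopB]
    rw [fibCalc_eq k]
    by_cases hle : (Nat.fib k : Int) ≤ max
    · rw [if_neg (by omega), if_pos hle]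
      have hk2 : Nat.fib k + Nat.fib (k + 1) = Nat.fib (k + 2) := Nat.fib_add_two.symm
      have hb : (Nat.fib k : Int) + (Nat.fib (k + 1) : Int) = (Nat.fib (k + 1 + 1) : Int) := by
        push_cast [← hk2]; ring
      rw [hb]
      apply ih
      · have hj0 : j ≠ 0 := by
          intro hje; rw [hje] at hfib; simp at hfib; omega
        refine ⟨j - 1, by omega, ?_⟩
        have : k + 1 + (j - 1) = k + j := by omega
        rw [this]; exact hfib
      · omega
    · rw [if_pos (by omega), if_neg hle]

lemma pyRange_map (max : Int) :
    PySem.List.pyRange 0 max 1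
      = (List.range max.toNat).map (fun j => ((0 + j : Nat) : Int)) := by
  rw [PySem.List.pyRange_one]
  simp only [sub_zero]
  apply List.map_congr_left
  intro x _
  push_cast; ring

-- tiny evaluation facts used in the small-max cases
lemma fibCalc_vals : fibCalc 0 = 0 ∧ fibCalc 1 = 1 ∧ fibCalc 2 = 1 ∧ fibCalc 3 = 2 ∧
    fibCalc 4 = 3 ∧ fibCalc 5 = 5 := by
  have h0 : fibCalc 0 = 0 := by rw [fibCalc]; norm_num
  have h1 : fibCalc 1 = 1 := by rw [fibCalc]; norm_num
  have h2 : fibCalc 2 = 1 := by rw [fibCalc]; norm_num [h0, h1]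
  have h3 : fibCalc 3 = 2 := by rw [fibCalc]; norm_num [h1, h2]
  have h4 : fibCalc 4 = 3 := by rw [fibCalc]; norm_num [h2, h3]
  have h5 : fibCalc 5 = 5 := by rw [fibCalc]; norm_num [h3, h4]
  exact ⟨h0, h1, h2, h3, h4, h5⟩

lemma eval_A : ∀ m : Int, 0 ≤ m → m ≤ 6 →
    FibonacciList m = (if m ≤ 0 then [] else if m = 1 then [0] else
      if m = 2 then [0, 1] else if m = 3 then [0, 1, 1] else
      if m = 4 then [0, 1, 1, 2] else if m = 5 then [0, 1, 1, 2, 3] else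
      [0, 1, 1, 2, 3, 5]) := by
  obtain ⟨h0, h1, h2, h3, h4, h5⟩ := fibCalc_vals
  intro m hm0 hm6
  interval_cases m <;>
    simp [FibonacciList, pyRange_map, List.range_succ, loopA, h0, h1, h2, h3, h4, h5]

lemma eval_B : ∀ m : Int, 0 ≤ m → m ≤ 6 →
    FibonacciList_alt m = (if m ≤ 0 then [0] else if m = 1 then [0, 1, 1] else
      if m = 2 then [0, 1, 1, 2] else if m ≤ 4 then [0, 1, 1, 2, 3] else
      [0, 1, 1, 2, 3, 5]) := by
  intro m hm0 hm6
  interval_cases m <;> simp [FibonacciList_alt, loopB]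

-- ===== VERDICT (by name: the statement is the Claim_ definition above) =====
theorem FibonacciList_spec : Claim_unchanged_FibonacciList := by
  intro max hdom hD
  unfold D_FibonacciList at hD
  have hcases : max < 0 ∨ max = 6 ∨ 7 ≤ max := by omega
  rcases hcases with hneg | h6 | h7
  · have hnil : PySem.List.pyRange 0 max 1 = [] :=
      PySem.List.pyRange_one_eq_nil (by omega)
    have ht : max.toNat = 0 := by omega
    rw [FibonacciList, FibonacciList_alt, hnil, ht]
    simp [loopA, loopB, show ¬ ((0 : Int) ≤ max) by omega]
  · rw [eval_A max (by omega) (by omega), eval_B max (by omega) (by omega)]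
    subst h6; norm_num
  · rw [FibonacciList, FibonacciList_alt, pyRange_map max]
    have hstart : loopB (max.toNat + 2) 0 1 max []
        = loopB (max.toNat + 2) (Nat.fib 0) (Nat.fib (0 + 1)) max [] := by norm_num [Nat.fib]
    rw [hstart]
    apply loop_eq
    · refine ⟨max.toNat - 1, by omega, ?_⟩
      simp only [Nat.zero_add]
      have hm : max.toNat - 1 = (max.toNat - 7) + 6 := by omega
      have := fib_lower (max.toNat - 7)
      rw [hm]
      have hcast : ((max.toNat - 7 : Nat) : Int) = max - 7 := by omega
      rw [hcast] at this
      omega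
    · omega

theorem FibonacciList_changed : Claim_changed_FibonacciList := by
  unfold Claim_changed_FibonacciList pvDiffWitness_FibonacciList pvDiffWitnessOut_FibonacciList
  refine ⟨by decide, by unfold D_FibonacciList; norm_num, ?_, ?_, by decide⟩
  · rw [eval_A 3 (by norm_num) (by norm_num)]; norm_num
  · rw [eval_B 3 (by norm_num) (by norm_num)]; norm_num

theorem FibonacciList_tight : Claim_exact_FibonacciList := by
  intro max _ hD
  unfold D_FibonacciList at hD
  obtain ⟨hD1, hD2⟩ := hD
  rw [eval_A max hD1 (by omega), eval_B max hD1 (by omega)]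
  interval_cases max <;> simp
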